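-- pv_equiv track=rewrite | github.com/priyank1810/prediq | tests/test_oi_maxpain.py | optimized_max_pain
-- ===== SOURCE A (Python) =====
-- def optimized_max_pain(strikes_data):
--     """O(n) prefix-sum implementation — mirrors oi_service.py logic."""
--     if not strikes_data:
--         return 0
--
--     n = len(strikes_data)
--     strikes = [sd[0] for sd in strikes_data]
--     ce_ois = [sd[1] for sd in strikes_data]
--     pe_ois = [sd[2] for sd in strikes_data]
--
--     sum_pe_below = 0
--     sum_pe_str_below = 0
--     sum_ce_above = sum(ce_ois)
--     sum_ce_str_above = sum(ce_ois[i] * strikes[i] for i in range(n))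
--
--     best_pain = -1
--     best_strike = strikes[0]
--
--     for k in range(n):
--         sum_ce_above -= ce_ois[k]
--         sum_ce_str_above -= ce_ois[k] * strikes[k]
--
--         pain = (strikes[k] * sum_pe_below - sum_pe_str_below +
--                 sum_ce_str_above - strikes[k] * sum_ce_above)
--
--         if pain > best_pain:
--             best_pain = pain
--             best_strike = strikes[k]
--
--         sum_pe_below += pe_ois[k]
--         sum_pe_str_below += pe_ois[k] * strikes[k]
--
--     return best_strike
-- ===== SOURCE B (Python) =====
-- def optimized_max_pain(strikes_data):
--     """Direct nested-loop implementation: pain(k) recomputed from scratch for each k."""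
--     if not strikes_data:
--         return 0
--     n = len(strikes_data)
--     best_pain = -1
--     best_strike = strikes_data[0][0]
--     for k in range(n):
--         sk = strikes_data[k][0]
--         pain = 0
--         for j in range(n):
--             sj, cj, pj = strikes_data[j]
--             if j < k:
--                 pain += pj * (sk - sj)
--             elif j > k:
--                 pain += cj * (sj - sk)
--         if pain > best_pain:
--             best_pain = pain
--             best_strike = sk
--     return best_strike
-- ===== Notes on version B (the rewrite author's own statement) =====
-- stated objective: simpler
-- what changed: Replaced the incremental prefix-sum pass maintaining four running totals with a plain nested loop that recomputes the writer payout pain(k) from scratch for each strike.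
import Mathlib
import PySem

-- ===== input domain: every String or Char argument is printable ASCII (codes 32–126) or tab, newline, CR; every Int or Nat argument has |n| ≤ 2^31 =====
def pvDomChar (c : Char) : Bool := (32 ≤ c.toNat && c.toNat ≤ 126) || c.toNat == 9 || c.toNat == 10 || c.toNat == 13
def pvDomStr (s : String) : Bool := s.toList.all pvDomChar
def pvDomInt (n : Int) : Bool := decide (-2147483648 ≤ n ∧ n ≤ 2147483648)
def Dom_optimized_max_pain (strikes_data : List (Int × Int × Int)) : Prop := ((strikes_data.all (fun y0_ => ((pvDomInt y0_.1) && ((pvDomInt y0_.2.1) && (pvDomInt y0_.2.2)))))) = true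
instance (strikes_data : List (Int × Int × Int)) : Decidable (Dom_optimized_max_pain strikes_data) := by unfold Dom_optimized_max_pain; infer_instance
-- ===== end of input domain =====

-- B is a plain nested loop recomputing pain(k) from scratch for every strike; simpler, no running totals (O(n^2) vs A's O(n)).

-- ===== PORT A =====
-- A's loop state: (sum_pe_below, sum_pe_str_below, sum_ce_above, sum_ce_str_above, best_pain, best_strike)
def optimized_max_pain (strikes_data : List (Int × Int × Int)) : Int :=
  if strikes_data = [] then 0
  else
    let n := strikes_data.length
    let strikes := strikes_data.map (·.1)
    let ce_ois := strikes_data.map (·.2.1)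
    let pe_ois := strikes_data.map (·.2.2)
    let init : Int × Int × Int × Int × Int × Int :=
      (0, 0, ce_ois.sum,
       ((List.range n).map (fun i => ce_ois.getD i 0 * strikes.getD i 0)).sum,
       -1, strikes.getD 0 0)
    let final := (List.range n).foldl (fun st k =>
      let sca := st.2.2.1 - ce_ois.getD k 0
      let scsa := st.2.2.2.1 - ce_ois.getD k 0 * strikes.getD k 0
      let pain := strikes.getD k 0 * st.1 - st.2.1 + scsa - strikes.getD k 0 * sca
      let bb : Int × Int := if pain > st.2.2.2.2.1 then (pain, strikes.getD k 0) else (st.2.2.2.2.1, st.2.2.2.2.2)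
      (st.1 + pe_ois.getD k 0, st.2.1 + pe_ois.getD k 0 * strikes.getD k 0, sca, scsa, bb.1, bb.2)) init
    final.2.2.2.2.2

-- ===== PORT B =====
def optimized_max_pain_alt (strikes_data : List (Int × Int × Int)) : Int :=
  match strikes_data with
  | [] => 0
  | (s0, _, _) :: _ =>
    let n := strikes_data.length
    let final := (List.range n).foldl (fun (st : Int × Int) k =>
      let sk := (strikes_data.getD k (0, 0, 0)).1
      let pain := (List.range n).foldl (fun acc j =>
        let t := strikes_data.getD j (0, 0, 0)
        if j < k then acc + t.2.2 * (sk - t.1)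
        else if j > k then acc + t.2.1 * (t.1 - sk)
        else acc) 0
      if pain > st.1 then (pain, sk) else st) (-1, s0)
    final.2

-- ===== PRECONDITION & SPEC =====
def Spec_optimized_max_pain (strikes_data : List (Int × Int × Int)) (out : Int) : Prop := out = optimized_max_pain_alt strikes_data
instance (strikes_data : List (Int × Int × Int)) (out : Int) : Decidable (Spec_optimized_max_pain strikes_data out) := by unfold Spec_optimized_max_pain; infer_instance

-- ===== CLAIM (what is proved, stated in full; the proofs are below) =====
def Claim_equal_optimized_max_pain : Prop := ∀ (strikes_data : List (Int × Int × Int)), Dom_optimized_max_pain strikes_data → Spec_optimized_max_pain strikes_data (optimized_max_pain strikes_data)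

-- ===== LEMMAS AND PROOFS =====

-- component accessors by index
def pvS (d : List (Int × Int × Int)) (j : Nat) : Int := (d.getD j (0, 0, 0)).1
def pvC (d : List (Int × Int × Int)) (j : Nat) : Int := (d.getD j (0, 0, 0)).2.1
def pvP (d : List (Int × Int × Int)) (j : Nat) : Int := (d.getD j (0, 0, 0)).2.2

-- B's pain(k) as a Finset sum
def pvPain (d : List (Int × Int × Int)) (k : Nat) : Int :=
  ∑ j ∈ Finset.range d.length,
    (if j < k then pvP d j * (pvS d k - pvS d j)
     else if k < j then pvC d j * (pvS d j - pvS d k) else 0)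

-- B's best-tracking fold over the first m indices
def pvBest (d : List (Int × Int × Int)) (m : Nat) : Int × Int :=
  (List.range m).foldl (fun st k => if pvPain d k > st.1 then (pvPain d k, pvS d k) else st) (-1, pvS d 0)

lemma getD_map_fst (d : List (Int × Int × Int)) (j : Nat) :
    (d.map (·.1)).getD j 0 = pvS d j := by
  unfold pvS
  rcases lt_or_ge j d.length with h | h
  · simp [h]
  · rw [List.getD_eq_default, List.getD_eq_default] <;> simp [h]

lemma getD_map_ce (d : List (Int × Int × Int)) (j : Nat) :
    (d.map (·.2.1)).getD j 0 = pvC d j := by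
  unfold pvC
  rcases lt_or_ge j d.length with h | h
  · simp [h]
  · rw [List.getD_eq_default, List.getD_eq_default] <;> simp [h]

lemma getD_map_pe (d : List (Int × Int × Int)) (j : Nat) :
    (d.map (·.2.2)).getD j 0 = pvP d j := by
  unfold pvP
  rcases lt_or_ge j d.length with h | h
  · simp [h]
  · rw [List.getD_eq_default, List.getD_eq_default] <;> simp [h]

lemma sum_eq_range_sum (l : List Int) :
    l.sum = ∑ j ∈ Finset.range l.length, l.getD j 0 := by
  induction l with
  | nil => simp
  | cons a t ih =>
    simp only [List.sum_cons, List.length_cons, Finset.sum_range_succ']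
    simp [ih, add_comm]

lemma map_range_sum (n : Nat) (f : Nat → Int) :
    ((List.range n).map f).sum = ∑ j ∈ Finset.range n, f j := by
  induction n with
  | zero => simp
  | succ m ih => simp [List.range_succ, Finset.sum_range_succ, ih]

-- the inner fold of B computes pvPain
lemma inner_fold_eq (d : List (Int × Int × Int)) (k : Nat) :
    (List.range d.length).foldl (fun acc j =>
        let t := d.getD j (0, 0, 0)
        if j < k then acc + t.2.2 * ((d.getD k (0,0,0)).1 - t.1)
        else if j > k then acc + t.2.1 * (t.1 - (d.getD k (0,0,0)).1)
        else acc) 0 = pvPain d k := by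
  unfold pvPain
  rw [← map_range_sum]
  have key : ∀ (m : Nat) (a : Int),
      (List.range m).foldl (fun acc j =>
        let t := d.getD j (0, 0, 0)
        if j < k then acc + t.2.2 * ((d.getD k (0,0,0)).1 - t.1)
        else if j > k then acc + t.2.1 * (t.1 - (d.getD k (0,0,0)).1)
        else acc) a
      = a + ((List.range m).map (fun j =>
          if j < k then pvP d j * (pvS d k - pvS d j)
          else if k < j then pvC d j * (pvS d j - pvS d k) else 0)).sum := by
    intro m
    induction m with
    | zero => simp
    | succ m ih =>
      intro a
      simp only [List.range_succ, List.foldl_append, List.foldl_cons, List.foldl_nil,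
        List.map_append, List.map_cons, List.map_nil, List.sum_append, List.sum_cons,
        List.sum_nil, ih]
      unfold pvS pvC pvP
      split_ifs with h1 h2 <;> ring
  simpa using key d.length 0

-- pvBest step
lemma pvBest_succ (d : List (Int × Int × Int)) (m : Nat) :
    pvBest d (m + 1) =
      (if pvPain d m > (pvBest d m).1 then (pvPain d m, pvS d m) else pvBest d m) := by
  unfold pvBest
  rw [List.range_succ, List.foldl_append]
  simp

-- pain formula: A's prefix-sum pain equals pvPain, for m < n
lemma painA_eq (d : List (Int × Int × Int)) (m : Nat) (hm : m < d.length) :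
    pvS d m * (∑ j ∈ Finset.range m, pvP d j) - (∑ j ∈ Finset.range m, pvP d j * pvS d j)
    + ((∑ j ∈ Finset.range d.length, pvC d j * pvS d j) - ∑ j ∈ Finset.range (m+1), pvC d j * pvS d j)
    - pvS d m * ((∑ j ∈ Finset.range d.length, pvC d j) - ∑ j ∈ Finset.range (m+1), pvC d j)
    = pvPain d m := by
  unfold pvPain
  have hsplit : ∀ (f : Nat → Int),
      ∑ j ∈ Finset.range d.length, f j
      = (∑ j ∈ Finset.range (m+1), f j) + ∑ j ∈ Finset.Ico (m+1) d.length, f j := by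
    intro f
    exact (Finset.sum_range_add_sum_Ico f hm).symm
  have h1 : ∑ j ∈ Finset.range (m+1),
      (if j < m then pvP d j * (pvS d m - pvS d j)
       else if m < j then pvC d j * (pvS d j - pvS d m) else 0)
      = pvS d m * (∑ j ∈ Finset.range m, pvP d j) - ∑ j ∈ Finset.range m, pvP d j * pvS d j := by
    have e1 : ∀ j ∈ Finset.range m,
        (if j < m then pvP d j * (pvS d m - pvS d j)
         else if m < j then pvC d j * (pvS d j - pvS d m) else 0)
        = pvS d m * pvP d j - pvP d j * pvS d j := by
      intro j hj
      rw [Finset.mem_range] at hj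
      rw [if_pos hj]; ring
    rw [Finset.sum_range_succ, if_neg (lt_irrefl m), if_neg (lt_irrefl m), add_zero,
      Finset.sum_congr rfl e1, Finset.sum_sub_distrib, ← Finset.mul_sum]
  have h2 : ∑ j ∈ Finset.Ico (m+1) d.length,
      (if j < m then pvP d j * (pvS d m - pvS d j)
       else if m < j then pvC d j * (pvS d j - pvS d m) else 0)
      = (∑ j ∈ Finset.Ico (m+1) d.length, pvC d j * pvS d j)
        - pvS d m * ∑ j ∈ Finset.Ico (m+1) d.length, pvC d j := by
    have e2 : ∀ j ∈ Finset.Ico (m+1) d.length,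
        (if j < m then pvP d j * (pvS d m - pvS d j)
         else if m < j then pvC d j * (pvS d j - pvS d m) else 0)
        = pvC d j * pvS d j - pvS d m * pvC d j := by
      intro j hj
      rw [Finset.mem_Ico] at hj
      rw [if_neg (by omega : ¬ j < m), if_pos (by omega : m < j)]; ring
    rw [Finset.sum_congr rfl e2, Finset.sum_sub_distrib, ← Finset.mul_sum]
  have h5 : ∀ (f : Nat → Int),
      ∑ j ∈ Finset.Ico (m+1) d.length, f j
      = (∑ j ∈ Finset.range d.length, f j) - ∑ j ∈ Finset.range (m+1), f j := by
    intro f; rw [hsplit f]; ring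
  rw [hsplit (fun j => if j < m then pvP d j * (pvS d m - pvS d j)
        else if m < j then pvC d j * (pvS d j - pvS d m) else 0),
    h1, h2, h5 (fun j => pvC d j * pvS d j), h5 (fun j => pvC d j)]
  ring

-- A's loop invariant over the first m steps
lemma loopA_invariant (d : List (Int × Int × Int)) (m : Nat) (hm : m ≤ d.length) :
    (List.range m).foldl (fun (st : Int × Int × Int × Int × Int × Int) k =>
      let sca := st.2.2.1 - (d.map (·.2.1)).getD k 0
      let scsa := st.2.2.2.1 - (d.map (·.2.1)).getD k 0 * (d.map (·.1)).getD k 0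
      let pain := (d.map (·.1)).getD k 0 * st.1 - st.2.1 + scsa - (d.map (·.1)).getD k 0 * sca
      let bb : Int × Int := if pain > st.2.2.2.2.1 then (pain, (d.map (·.1)).getD k 0) else (st.2.2.2.2.1, st.2.2.2.2.2)
      (st.1 + (d.map (·.2.2)).getD k 0, st.2.1 + (d.map (·.2.2)).getD k 0 * (d.map (·.1)).getD k 0, sca, scsa, bb.1, bb.2))
      (0, 0, (d.map (·.2.1)).sum,
       ((List.range d.length).map (fun i => (d.map (·.2.1)).getD i 0 * (d.map (·.1)).getD i 0)).sum,
       -1, (d.map (·.1)).getD 0 0)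
    = (∑ j ∈ Finset.range m, pvP d j,
       ∑ j ∈ Finset.range m, pvP d j * pvS d j,
       (∑ j ∈ Finset.range d.length, pvC d j) - ∑ j ∈ Finset.range m, pvC d j,
       (∑ j ∈ Finset.range d.length, pvC d j * pvS d j) - ∑ j ∈ Finset.range m, pvC d j * pvS d j,
       (pvBest d m).1, (pvBest d m).2) := by
  induction m with
  | zero =>
    simp only [List.range_zero, List.foldl_nil, Finset.range_zero, Finset.sum_empty,
      sub_zero, pvBest, List.foldl_nil]
    have hc : (d.map (·.2.1)).sum = ∑ j ∈ Finset.range d.length, pvC d j := by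
      rw [sum_eq_range_sum]
      simp only [List.length_map]
      exact Finset.sum_congr rfl (fun j _ => getD_map_ce d j)
    have hcs : ((List.range d.length).map (fun i => (d.map (·.2.1)).getD i 0 * (d.map (·.1)).getD i 0)).sum
        = ∑ j ∈ Finset.range d.length, pvC d j * pvS d j := by
      rw [map_range_sum]
      exact Finset.sum_congr rfl (fun j _ => by rw [getD_map_ce, getD_map_fst])
    rw [hc, hcs, getD_map_fst]
  | succ m ih =>
    have hm' : m ≤ d.length := Nat.le_of_succ_le hm
    have hmlt : m < d.length := hm
    rw [List.range_succ, List.foldl_append, ih hm', List.foldl_cons, List.foldl_nil]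
    simp only [getD_map_fst, getD_map_ce, getD_map_pe]
    have hsca : ((∑ j ∈ Finset.range d.length, pvC d j) - ∑ j ∈ Finset.range m, pvC d j) - pvC d m
        = (∑ j ∈ Finset.range d.length, pvC d j) - ∑ j ∈ Finset.range (m+1), pvC d j := by
      rw [Finset.sum_range_succ]; ring
    have hscs : ((∑ j ∈ Finset.range d.length, pvC d j * pvS d j) - ∑ j ∈ Finset.range m, pvC d j * pvS d j) - pvC d m * pvS d m
        = (∑ j ∈ Finset.range d.length, pvC d j * pvS d j) - ∑ j ∈ Finset.range (m+1), pvC d j * pvS d j := by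
      rw [Finset.sum_range_succ]; ring
    simp only [hsca, hscs]
    have hpain := painA_eq d m hmlt
    rw [hpain]
    rw [pvBest_succ]
    have hp : (∑ j ∈ Finset.range m, pvP d j) + pvP d m = ∑ j ∈ Finset.range (m+1), pvP d j := by
      rw [Finset.sum_range_succ]
    have hps : (∑ j ∈ Finset.range m, pvP d j * pvS d j) + pvP d m * pvS d m
        = ∑ j ∈ Finset.range (m+1), pvP d j * pvS d j := by
      rw [Finset.sum_range_succ]
    rw [hp, hps]

-- B's outer fold equals pvBest
lemma loopB_eq (d : List (Int × Int × Int)) (s0 : Int) (h : pvS d 0 = s0) :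
    (List.range d.length).foldl (fun (st : Int × Int) k =>
      let sk := (d.getD k (0, 0, 0)).1
      let pain := (List.range d.length).foldl (fun acc j =>
        let t := d.getD j (0, 0, 0)
        if j < k then acc + t.2.2 * (sk - t.1)
        else if j > k then acc + t.2.1 * (t.1 - sk)
        else acc) 0
      if pain > st.1 then (pain, sk) else st) (-1, s0)
    = pvBest d d.length := by
  subst h
  unfold pvBest
  have hf : (fun (st : Int × Int) k =>
      let sk := (d.getD k (0, 0, 0)).1
      let pain := (List.range d.length).foldl (fun acc j =>
        let t := d.getD j (0, 0, 0)
        if j < k then acc + t.2.2 * (sk - t.1)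
        else if j > k then acc + t.2.1 * (t.1 - sk)
        else acc) 0
      if pain > st.1 then (pain, sk) else st)
      = (fun (st : Int × Int) k => if pvPain d k > st.1 then (pvPain d k, pvS d k) else st) := by
    funext st k
    simp only [inner_fold_eq d k]
    rfl
  rw [hf]

-- ===== VERDICT (by name: the statement is the Claim_ definition above) =====
theorem optimized_max_pain_spec : Claim_equal_optimized_max_pain := by
  intro d _
  unfold Spec_optimized_max_pain optimized_max_pain optimized_max_pain_alt
  match d with
  | [] => rfl
  | (s0, c0, p0) :: t =>
    simp only [if_neg (List.cons_ne_nil _ _)]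
    rw [loopA_invariant ((s0, c0, p0) :: t) (((s0, c0, p0) :: t).length) le_rfl]
    rw [loopB_eq ((s0, c0, p0) :: t) s0 rfl]
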